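-- pv_equiv track=rewrite | github.com/MhGhobashy/Drugs-Interaction-Checker | app.py | handle_vitamin_exception
-- ===== SOURCE A (Python) =====
-- def handle_vitamin_exception(text):
--     """
--     Handle special case when 'vitamin' is found in the text.
--     This function ensures 'Vitamin' is followed by another word (e.g., 'A', 'B', 'C') and extracts both.
--     """
--     words = text.lower().split()
--
--     # Find the index of the word 'vitamin'
--     vitamin_index = [i for i, word in enumerate(words) if word == 'vitamin']
--
--     if vitamin_index:
--         # For each occurrence of 'vitamin', check the following word and append it
--         for idx in vitamin_index:
--             if idx + 1 < len(words):
--                 vitamin_combination = f"vitamin {words[idx + 1]}"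
--                 text += f" {vitamin_combination}"  # Add 'vitamin + next word' to the search text
--
--     return text
-- ===== SOURCE B (Python) =====
-- def handle_vitamin_exception(text):
--     def suffix(ws):
--         # recursively build the whole string to append, back over the word list
--         if len(ws) < 2:
--             return ''
--         head = ' vitamin ' + ws[1] if ws[0] == 'vitamin' else ''
--         return head + suffix(ws[1:])
--     return text + suffix(text.lower().split())
-- ===== Notes on version B (the rewrite author's own statement) =====
-- stated objective: alternative
-- what changed: Replaces A's two-stage index-list + mutating accumulation onto text with a pure recursive decomposition: a recursion over the word list computes the entire suffix string to append, which is concatenated to text exactly once.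
import Mathlib
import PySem

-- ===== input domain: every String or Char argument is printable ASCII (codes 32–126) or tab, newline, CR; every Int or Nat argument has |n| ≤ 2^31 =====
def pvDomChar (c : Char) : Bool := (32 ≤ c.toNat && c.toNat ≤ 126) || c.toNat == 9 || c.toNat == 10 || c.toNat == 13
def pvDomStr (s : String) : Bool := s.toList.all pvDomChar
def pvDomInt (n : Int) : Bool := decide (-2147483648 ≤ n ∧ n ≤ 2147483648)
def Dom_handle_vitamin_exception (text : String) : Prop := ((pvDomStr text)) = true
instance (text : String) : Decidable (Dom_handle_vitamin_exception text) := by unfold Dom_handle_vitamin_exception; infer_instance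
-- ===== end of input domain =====

-- B replaces A's index-list + repeated appends onto text with a recursive function
-- that computes the full suffix string once, concatenated to text once (alternative decomposition).


-- ===== PORT A =====
-- [i for i, word in enumerate(words) if word == 'vitamin']
-- (hand-ported comprehension; enumerate indices are the Nat positions 0,1,2,… — exact here)
def pvIdxs (words : List String) (i : Nat) : List Nat :=
  match words with
  | [] => []
  | w :: ws => (if w = "vitamin" then [i] else []) ++ pvIdxs ws (i + 1)

-- body of A's for-loop: if idx + 1 < len(words): text += " " + f"vitamin {words[idx+1]}"
-- (words[idx+1] is in range when the guard holds, so List.getD is exact)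
def pvStepA (words : List String) (t : String) (idx : Nat) : String :=
  if idx + 1 < words.length then t ++ " vitamin " ++ words.getD (idx + 1) "" else t

def handle_vitamin_exception (text : String) : String :=
  let words := PySem.Str.split₀ (PySem.Str.lower text)
  let vitamin_index := pvIdxs words 0
  if vitamin_index.isEmpty then text
  else vitamin_index.foldl (pvStepA words) text

-- ===== PORT B =====
-- Source B's inner 'suffix': recursion over the word list building the string to append
-- (len(ws) < 2 base case; head chosen from ws[0], ws[1]; recurse on ws[1:])
def pvSuffix : List String → String
  | [] => ""
  | [_] => ""
  | a :: b :: rest =>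
      (if a = "vitamin" then " vitamin " ++ b else "") ++ pvSuffix (b :: rest)

def handle_vitamin_exception_alt (text : String) : String :=
  text ++ pvSuffix (PySem.Str.split₀ (PySem.Str.lower text))

-- ===== PRECONDITION & SPEC =====
def Spec_handle_vitamin_exception (text : String) (out : String) : Prop := out = handle_vitamin_exception_alt text
instance (text : String) (out : String) : Decidable (Spec_handle_vitamin_exception text out) := by unfold Spec_handle_vitamin_exception; infer_instance

-- ===== CLAIM (what is proved, stated in full; the proofs are below) =====
def Claim_equal_handle_vitamin_exception : Prop := ∀ (text : String), Dom_handle_vitamin_exception text → Spec_handle_vitamin_exception text (handle_vitamin_exception text)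

-- ===== LEMMAS AND PROOFS =====

theorem pvIdxs_shift (ws : List String) (i : Nat) :
    pvIdxs ws (i + 1) = (pvIdxs ws i).map (· + 1) := by
  induction ws generalizing i with
  | nil => simp [pvIdxs]
  | cons w ws ih =>
    simp only [pvIdxs, ih, List.map_append]
    split <;> simp

theorem pvStepA_shift (a : String) (ws : List String) (t : String) (k : Nat) :
    pvStepA (a :: ws) t (k + 1) = pvStepA ws t k := by
  simp [pvStepA, List.getD]

theorem pv_main (ws : List String) (t : String) :
    (pvIdxs ws 0).foldl (pvStepA ws) t = t ++ pvSuffix ws := by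
  induction ws generalizing t with
  | nil => simp [pvIdxs, pvSuffix]
  | cons a ws ih =>
    have hshift : ∀ s, ((pvIdxs ws 0).map (· + 1)).foldl (pvStepA (a :: ws)) s
        = (pvIdxs ws 0).foldl (pvStepA ws) s := by
      intro s
      rw [List.foldl_map]
      have hf : (fun (s' : String) (k : Nat) => pvStepA (a :: ws) s' (k + 1)) = pvStepA ws := by
        funext s' k; exact pvStepA_shift a ws s' k
      rw [hf]
    cases ws with
    | nil =>
      by_cases h : a = "vitamin" <;> simp [pvIdxs, pvSuffix, pvStepA, h]
    | cons b rest =>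
      by_cases h : a = "vitamin"
      · have hl : pvIdxs (a :: b :: rest) 0 = 0 :: (pvIdxs (b :: rest) 0).map (· + 1) := by
          simp only [pvIdxs, h, if_true, pvIdxs_shift]
          split <;> simp
        rw [hl, List.foldl_cons, hshift, ih]
        have h0 : pvStepA (a :: b :: rest) t 0 = t ++ " vitamin " ++ b := by
          simp [pvStepA, List.getD]
        rw [h0]
        simp [pvSuffix, h, String.append_assoc]
      · have hl : pvIdxs (a :: b :: rest) 0 = (pvIdxs (b :: rest) 0).map (· + 1) := by
          simp only [pvIdxs, h, if_false, pvIdxs_shift]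
          split <;> simp
        rw [hl, hshift, ih]
        simp [pvSuffix, h]

-- ===== VERDICT (by name: the statement is the Claim_ definition above) =====
theorem handle_vitamin_exception_spec : Claim_equal_handle_vitamin_exception := by
  intro text _
  unfold Spec_handle_vitamin_exception handle_vitamin_exception handle_vitamin_exception_alt
  set ws := PySem.Str.split₀ (PySem.Str.lower text) with hws
  have h := pv_main ws text
  by_cases h0 : (pvIdxs ws 0).isEmpty
  · have he : pvIdxs ws 0 = [] := by simpa using h0
    rw [he] at h
    simpa [he] using h
  · simpa [h0] using h
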